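-- pv_equiv track=rewrite | github.com/saurabhh-svg/Contests | Temp/rootPathSubstet.py | find_subsets_sum
-- ===== SOURCE A (Python) =====
-- MOD = 10**9 + 7
--
-- def count_subsets_with_sum(values, target_sum):
--     dp = [0] * (target_sum + 1)
--     dp[0] = 1
--
--     for value in values:
--         for j in range(target_sum, value - 1, -1):
--             dp[j] = (dp[j] + dp[j - value]) % MOD
--
--     return dp[target_sum]
--
-- def dfs(node, parent, graph, values, K, path_values, total):
--     path_values.append(values[node - 1])
--
--     count = count_subsets_with_sum(path_values, K)
--     total[0] = (total[0] + count) % MOD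
--
--     for neighbor in graph[node]:
--         if neighbor != parent:
--             dfs(neighbor, node, graph, values, K, path_values, total)
--
--     path_values.pop()
--
-- def find_subsets_sum(N, M, K, values, edges):
--     graph = [[] for _ in range(N + 1)]
--     for u, v in edges:
--         graph[u].append(v)
--         graph[v].append(u)
--
--     total = [0]
--     path_values = []
--
--     dfs(1, -1, graph, values, K, path_values, total)
--
--     return total[0]
-- ===== SOURCE B (Python) =====
-- MOD = 10**9 + 7
--
-- def find_subsets_sum(N, M, K, values, edges):
--     graph = [[] for _ in range(N + 1)]
--     for u, v in edges:
--         graph[u].append(v)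
--         graph[v].append(u)
--
--     total = 0
--
--     def dfs(node, parent, dp):
--         nonlocal total
--         v = values[node - 1]
--         # extend the subset-sum table by this node's value (persistent: no undo needed)
--         dp2 = [(dp[j] + dp[j - v]) % MOD if j >= v else dp[j] for j in range(K + 1)]
--         total = (total + dp2[K]) % MOD
--         for nb in graph[node]:
--             if nb != parent:
--                 dfs(nb, node, dp2)
--
--     dp0 = [0] * (K + 1)
--     dp0[0] = 1
--     dfs(1, -1, dp0)
--     return total
-- ===== Notes on version B (the rewrite author's own statement) =====
-- stated objective: alternative
-- what changed: Instead of recomputing the whole root-path subset-sum DP from scratch at every node, B carries one persistent dp table down the DFS and extends it by a single pass per node (no per-node recomputation, no shared mutable path list).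
-- outside the precondition, e.g. on find_subsets_sum(1, 0, 1, [1], [(1, 1)]): A returns 5, B returns 5; on find_subsets_sum(3, 0, 2, [1, 1], [(1, 2)]): A returns 1, B returns 1; on find_subsets_sum(2, 0, 1, [1, 2], [(1, -1)]): A returns 1, B returns 1
import Mathlib
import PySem

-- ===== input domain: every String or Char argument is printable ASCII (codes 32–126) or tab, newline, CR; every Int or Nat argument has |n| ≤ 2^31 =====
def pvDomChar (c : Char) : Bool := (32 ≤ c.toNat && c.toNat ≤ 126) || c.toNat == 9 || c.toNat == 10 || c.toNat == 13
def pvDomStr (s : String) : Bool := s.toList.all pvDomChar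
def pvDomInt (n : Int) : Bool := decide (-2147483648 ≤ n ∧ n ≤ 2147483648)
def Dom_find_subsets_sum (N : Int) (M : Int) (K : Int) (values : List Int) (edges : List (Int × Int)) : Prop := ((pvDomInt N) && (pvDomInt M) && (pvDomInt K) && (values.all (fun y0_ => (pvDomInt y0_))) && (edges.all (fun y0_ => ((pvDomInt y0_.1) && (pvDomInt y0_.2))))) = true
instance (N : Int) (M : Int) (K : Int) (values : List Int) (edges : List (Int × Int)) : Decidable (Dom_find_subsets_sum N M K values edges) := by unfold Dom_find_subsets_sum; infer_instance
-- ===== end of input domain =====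

-- B replaces A's per-node from-scratch subset-sum recomputation over the whole root path
-- with one persistent dp table carried down the DFS and extended by one value per node.

def pvMOD : Int := 1000000007

-- ===== PORT A =====
-- count_subsets_with_sum: dp of size K+1, for each value an in-place downward update.
-- The dfs recursion is ported with fuel N+1 (inside Pre_ the edges form a forest of
-- simple in-range edges, so the DFS depth is at most N and the fuel is never exhausted).
-- Indices into dp are ≥ 0 inside Pre_ (values ≥ 0), so pySetD/pyGetD are exact here.
def pv_count_subsets_with_sum (values : List Int) (target_sum : Int) : Int :=
  let dp : List Int := PySem.List.pySetD (List.replicate (target_sum + 1).toNat (0 : Int)) 0 1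
  let dp := values.foldl (fun dp value =>
      (PySem.List.pyRange target_sum (value - 1) (-1)).foldl
        (fun d j => PySem.List.pySetD d j
          (PySem.Int.mod (PySem.List.pyGetD d j 0 + PySem.List.pyGetD d (j - value) 0) pvMOD)) dp) dp
  PySem.List.pyGetD dp target_sum 0

def pv_dfsA (graph : List (List Int)) (values : List Int) (K : Int) :
    Nat → Int → Int → List Int → Int → Int
  | 0, _, _, _, total => total
  | fuel + 1, node, parent, path_values, total =>
    let path_values := path_values ++ [PySem.List.pyGetD values (node - 1) 0]
    let count := pv_count_subsets_with_sum path_values K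
    let total := PySem.Int.mod (total + count) pvMOD
    (PySem.List.pyGetD graph node []).foldl
      (fun t neighbor =>
        if neighbor ≠ parent then pv_dfsA graph values K fuel neighbor node path_values t else t)
      total

def find_subsets_sum (N : Int) (M : Int) (K : Int) (values : List Int) (edges : List (Int × Int)) : Int :=
  let graph := edges.foldl (fun g e =>
      let g := PySem.List.pySetD g e.1 (PySem.List.pyGetD g e.1 [] ++ [e.2])
      PySem.List.pySetD g e.2 (PySem.List.pyGetD g e.2 [] ++ [e.1]))
    (List.replicate (N + 1).toNat ([] : List Int))
  pv_dfsA graph values K (N.toNat + 1) 1 (-1) [] 0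

-- ===== PORT B =====
-- dfs carries the dp table down the tree; each node builds dp2 from dp by one comprehension
-- over range(K+1) (persistent extension, no undo), adds dp2[K] to the total, and passes dp2
-- to the children. Same fuel convention as port A.
def pv_dfsB (graph : List (List Int)) (values : List Int) (K : Int) :
    Nat → Int → Int → List Int → Int → Int
  | 0, _, _, _, total => total
  | fuel + 1, node, parent, dp, total =>
    let v := PySem.List.pyGetD values (node - 1) 0
    let dp2 := (PySem.List.pyRange 0 (K + 1) 1).map (fun j =>
        if v ≤ j then
          PySem.Int.mod (PySem.List.pyGetD dp j 0 + PySem.List.pyGetD dp (j - v) 0) pvMOD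
        else PySem.List.pyGetD dp j 0)
    let total := PySem.Int.mod (total + PySem.List.pyGetD dp2 K 0) pvMOD
    (PySem.List.pyGetD graph node []).foldl
      (fun t nb => if nb ≠ parent then pv_dfsB graph values K fuel nb node dp2 t else t)
      total

def find_subsets_sum_alt (N : Int) (M : Int) (K : Int) (values : List Int) (edges : List (Int × Int)) : Int :=
  let graph := edges.foldl (fun g e =>
      let g := PySem.List.pySetD g e.1 (PySem.List.pyGetD g e.1 [] ++ [e.2])
      PySem.List.pySetD g e.2 (PySem.List.pyGetD g e.2 [] ++ [e.1]))
    (List.replicate (N + 1).toNat ([] : List Int))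
  let dp0 := PySem.List.pySetD (List.replicate (K + 1).toNat (0 : Int)) 0 1
  pv_dfsB graph values K (N.toNat + 1) 1 (-1) dp0 0

-- ===== PRECONDITION & SPEC =====
-- Incremental union-find-style forest check over the edge list: duplicate copies of an
-- already-inserted undirected edge are allowed (A just skips them via the parent check),
-- any other edge joining two already-connected nodes (incl. self-loops) fails the check.
def pvForest (N : Int) (edges : List (Int × Int)) : Bool :=
  (edges.foldl (fun st e =>
     match st with
     | none => none
     | some (comp, seen) =>
       let a := min e.1 e.2
       let b := max e.1 e.2
       if seen.contains (a, b) then some (comp, seen)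
       else
         let cu := comp.getD a.toNat 0
         let cv := comp.getD b.toNat 0
         if cu = cv then none
         else some (comp.map (fun c => if c = cv then cu else c), (a, b) :: seen))
    (some (List.range (N + 1).toNat, ([] : List (Int × Int))))).isSome

-- Pre_ admits the inputs on which A demonstrably returns normally, as two closed-form
-- families: (a) a genuine forest over nodes 1..N given in ANY edge order (duplicate edges
-- allowed), with K ≥ 0 and at least N nonnegative values — K < 0, a reached negative value
-- and an out-of-range endpoint all raise IndexError in A, and a real cycle makes A recurse
-- forever; or (b) no edge touches node 1's list slot (so A's DFS visits only the root;
-- endpoints stay inside Python's wraparound range and values[0] ≥ 0).  It still excludes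
-- some corners where A returns a Python-artifact value and B happens to agree: self-loops
-- reachable from 1 (double traversal), wrapped negative endpoints in 1's component, values
-- lists shorter than N whose missing nodes are unreached, and negative values on unreached
-- nodes — see claim.json cites.
abbrev pvEdgeOk (N u : Int) : Prop := -(N + 1) ≤ u ∧ u ≤ N ∧ u ≠ 1 ∧ u ≠ -N

def Pre_find_subsets_sum (N : Int) (M : Int) (K : Int) (values : List Int) (edges : List (Int × Int)) : Prop :=
  1 ≤ N ∧ 0 ≤ K ∧
  ((N.toNat ≤ values.length ∧ (∀ x ∈ values, 0 ≤ x) ∧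
    (∀ e ∈ edges, 1 ≤ e.1 ∧ e.1 ≤ N ∧ 1 ≤ e.2 ∧ e.2 ≤ N) ∧
    pvForest N edges = true) ∨
   (values ≠ [] ∧ 0 ≤ values.headD 0 ∧ ∀ e ∈ edges, pvEdgeOk N e.1 ∧ pvEdgeOk N e.2))
instance (N : Int) (M : Int) (K : Int) (values : List Int) (edges : List (Int × Int)) : Decidable (Pre_find_subsets_sum N M K values edges) := by unfold Pre_find_subsets_sum; infer_instance

def pvWitness_find_subsets_sum : Int × Int × Int × List Int × (List (Int × Int)) :=
  (3, 2, 2, [1, 1, 1], [(2, 3), (1, 2)])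

def Spec_find_subsets_sum (N : Int) (M : Int) (K : Int) (values : List Int) (edges : List (Int × Int)) (out : Int) : Prop := out = find_subsets_sum_alt N M K values edges
instance (N : Int) (M : Int) (K : Int) (values : List Int) (edges : List (Int × Int)) (out : Int) : Decidable (Spec_find_subsets_sum N M K values edges out) := by unfold Spec_find_subsets_sum; infer_instance

-- ===== CLAIM (what is proved, stated in full; the proofs are below) =====
def Claim_equal_find_subsets_sum : Prop := ∀ (N : Int) (M : Int) (K : Int) (values : List Int) (edges : List (Int × Int)), Dom_find_subsets_sum N M K values edges → Pre_find_subsets_sum N M K values edges → Spec_find_subsets_sum N M K values edges (find_subsets_sum N M K values edges)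

-- ===== LEMMAS AND PROOFS =====

-- A's in-place downward update for one value, and B's comprehension for one value.
def pvUpd (v : Int) (d : List Int) (j : Int) : List Int :=
  PySem.List.pySetD d j (PySem.Int.mod (PySem.List.pyGetD d j 0 + PySem.List.pyGetD d (j - v) 0) pvMOD)

def pvStepA (K v : Int) (dp : List Int) : List Int :=
  (PySem.List.pyRange K (v - 1) (-1)).foldl (pvUpd v) dp

def pvStepB (K v : Int) (dp : List Int) : List Int :=
  (PySem.List.pyRange 0 (K + 1) 1).map (fun j =>
    if v ≤ j then PySem.Int.mod (PySem.List.pyGetD dp j 0 + PySem.List.pyGetD dp (j - v) 0) pvMOD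
    else PySem.List.pyGetD dp j 0)

def pvDp0 (K : Int) : List Int :=
  PySem.List.pySetD (List.replicate (K + 1).toNat (0 : Int)) 0 1

def pvDpA (K : Int) (path : List Int) : List Int :=
  path.foldl (fun dp value => pvStepA K value dp) (pvDp0 K)

lemma pv_count_eq_dpA (xs : List Int) (K : Int) :
    pv_count_subsets_with_sum xs K = PySem.List.pyGetD (pvDpA K xs) K 0 := rfl

lemma pv_getD_set_self {dp : List Int} {t : Int} (x : Int)
    (ht : 0 ≤ t) (hlt : t < (dp.length : Int)) :
    PySem.List.pyGetD (PySem.List.pySetD dp t x) t 0 = x := by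
  rw [PySem.List.pySetD_of_nonneg dp x ht, PySem.List.pyGetD_of_nonneg _ _ ht]
  rw [List.getD_eq_getElem?_getD, List.getElem?_set_self (by omega)]
  rfl

lemma pv_getD_set_ne {dp : List Int} {t i : Int} (x : Int)
    (ht : 0 ≤ t) (hi : 0 ≤ i) (hne : i ≠ t) :
    PySem.List.pyGetD (PySem.List.pySetD dp t x) i 0 = PySem.List.pyGetD dp i 0 := by
  rw [PySem.List.pySetD_of_nonneg dp x ht, PySem.List.pyGetD_of_nonneg _ _ hi,
    PySem.List.pyGetD_of_nonneg _ _ hi]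
  rw [List.getD_eq_getElem?_getD, List.getElem?_set_ne (by omega), ← List.getD_eq_getElem?_getD]

-- pointwise description of A's in-place downward loop for one value
lemma pv_descChar {v : Int} (hv : 0 ≤ v) :
    ∀ (n : Nat) (t : Int) (dp : List Int), (t - (v - 1)).toNat = n → t < (dp.length : Int) →
    ∀ i : Int, 0 ≤ i →
    PySem.List.pyGetD ((PySem.List.pyRange t (v - 1) (-1)).foldl (pvUpd v) dp) i 0 =
      if v ≤ i ∧ i ≤ t then
        PySem.Int.mod (PySem.List.pyGetD dp i 0 + PySem.List.pyGetD dp (i - v) 0) pvMOD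
      else PySem.List.pyGetD dp i 0 := by
  intro n
  induction n with
  | zero =>
    intro t dp h0 _ i _
    rw [PySem.List.pyRange_neg_one_eq_nil (by omega), List.foldl_nil, if_neg (by omega)]
  | succ n ih =>
    intro t dp hn hlen i hi
    rw [PySem.List.pyRange_neg_one_cons (show v - 1 < t by omega), List.foldl_cons]
    have hlen' : (t - 1) < (((pvUpd v dp t).length : Nat) : Int) := by
      simp only [pvUpd, PySem.List.length_pySetD]; omega
    rw [ih (t - 1) (pvUpd v dp t) (by omega) hlen' i hi]
    have ht0 : 0 ≤ t := by omega
    by_cases hit : i = t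
    · subst hit
      rw [if_neg (by omega), if_pos (by omega)]
      simp only [pvUpd]
      exact pv_getD_set_self _ ht0 hlen
    · have hgi : PySem.List.pyGetD (pvUpd v dp t) i 0 = PySem.List.pyGetD dp i 0 :=
        pv_getD_set_ne _ ht0 hi hit
      by_cases hc : v ≤ i ∧ i ≤ t - 1
      · have h2 : PySem.List.pyGetD (pvUpd v dp t) (i - v) 0 =
            PySem.List.pyGetD dp (i - v) 0 :=
          pv_getD_set_ne _ ht0 (by omega) (by omega)
        rw [if_pos hc, if_pos (by omega), hgi, h2]
      · rw [if_neg hc, if_neg (by omega), hgi]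

lemma pv_len_foldUpd (v : Int) :
    ∀ (js : List Int) (dp : List Int), (js.foldl (pvUpd v) dp).length = dp.length := by
  intro js
  induction js with
  | nil => intro dp; rfl
  | cons j js ih =>
    intro dp
    rw [List.foldl_cons, ih]
    simp [pvUpd, PySem.List.length_pySetD]

lemma pv_stepA_eq_stepB {K v : Int} (hv : 0 ≤ v) (hK : 0 ≤ K) {dp : List Int}
    (hlen : dp.length = (K + 1).toNat) : pvStepA K v dp = pvStepB K v dp := by
  have hlenA : (pvStepA K v dp).length = (K + 1).toNat := by
    rw [pvStepA, pv_len_foldUpd, hlen]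
  have hlenB : (pvStepB K v dp).length = (K + 1).toNat := by
    simp [pvStepB, PySem.List.length_pyRange_one]
  apply List.ext_getElem (by omega)
  intro k hk1 hk2
  have hkK : (k : Int) ≤ K := by omega
  have lhs : (pvStepA K v dp)[k] = PySem.List.pyGetD (pvStepA K v dp) (k : Int) 0 := by
    rw [PySem.List.pyGetD_natCast, List.getD_eq_getElem?_getD, List.getElem?_eq_getElem hk1]
    rfl
  rw [lhs, pvStepA,
    pv_descChar hv (K - (v - 1)).toNat K dp rfl (by omega) (k : Int) (by omega)]
  simp only [pvStepB, List.getElem_map, PySem.List.getElem_pyRange_one, zero_add]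
  by_cases hvk : v ≤ (k : Int)
  · rw [if_pos ⟨hvk, hkK⟩, if_pos hvk]
  · rw [if_neg (by omega), if_neg hvk]

lemma pv_len_dpA (K : Int) (path : List Int) : (pvDpA K path).length = (K + 1).toNat := by
  rw [pvDpA]
  induction path using List.reverseRecOn with
  | nil => simp [pvDp0, PySem.List.length_pySetD]
  | append_singleton xs x ih =>
    rw [List.foldl_append, List.foldl_cons, List.foldl_nil, pvStepA, pv_len_foldUpd, ih]

lemma pv_dpA_append (K : Int) (path : List Int) (v : Int) :
    pvDpA K (path ++ [v]) = pvStepA K v (pvDpA K path) := by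
  rw [pvDpA, List.foldl_append, List.foldl_cons, List.foldl_nil]; rfl

lemma pv_getD_nonneg {values : List Int} (h : ∀ x ∈ values, 0 ≤ x) (i : Int) :
    0 ≤ PySem.List.pyGetD values i 0 := by
  cases hg : PySem.List.pyGet? values i with
  | none => simp [PySem.List.pyGetD, hg]
  | some x =>
    have := PySem.List.mem_of_pyGet?_eq_some values hg
    simp [PySem.List.pyGetD, hg]
    exact h x this

-- the two DFS recursions agree for ANY graph and fuel once B's carried dp table
-- is the table A would recompute from the current path
lemma pv_dfs_eq (graph : List (List Int)) (values : List Int) (K : Int)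
    (hK : 0 ≤ K) (hvals : ∀ x ∈ values, 0 ≤ x) :
    ∀ (fuel : Nat) (node parent : Int) (path : List Int) (total : Int),
    pv_dfsB graph values K fuel node parent (pvDpA K path) total =
      pv_dfsA graph values K fuel node parent path total := by
  intro fuel
  induction fuel with
  | zero => intro node parent path total; rfl
  | succ fuel ih =>
    intro node parent path total
    rw [pv_dfsA, pv_dfsB]
    have hv : 0 ≤ PySem.List.pyGetD values (node - 1) 0 := pv_getD_nonneg hvals _
    set v := PySem.List.pyGetD values (node - 1) 0 with hvdef
    have hdp2 : (PySem.List.pyRange 0 (K + 1) 1).map (fun j =>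
        if v ≤ j then
          PySem.Int.mod (PySem.List.pyGetD (pvDpA K path) j 0 +
            PySem.List.pyGetD (pvDpA K path) (j - v) 0) pvMOD
        else PySem.List.pyGetD (pvDpA K path) j 0) = pvDpA K (path ++ [v]) := by
      rw [pv_dpA_append, pv_stepA_eq_stepB hv hK (pv_len_dpA K path)]; rfl
    simp only [hdp2, pv_count_eq_dpA]
    exact PySem.List.foldl_congr_mem _ _ _ _ (fun acc nb _ => by
      by_cases hnb : nb ≠ parent
      · simp only [if_pos hnb]; exact ih nb node (path ++ [v]) acc
      · simp only [if_neg hnb])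


-- graph slot 1 is untouched when every edge endpoint satisfies pvEdgeOk
lemma pv_setD_getD_one {g : List (List Int)} {u N : Int} (x : List Int)
    (hlen : g.length = (N + 1).toNat) (hN : 1 ≤ N) (hok : pvEdgeOk N u) :
    PySem.List.pyGetD (PySem.List.pySetD g u x) 1 [] = PySem.List.pyGetD g 1 [] := by
  obtain ⟨h3, h4, h1, h2⟩ := hok
  have hgd : ∀ h : List (List Int), PySem.List.pyGetD h 1 [] = h.getD 1 [] := fun h => by
    have h1 := PySem.List.pyGetD_of_nonneg h ([] : List Int) (show (0:Int) ≤ 1 by omega)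
    simpa using h1
  rw [hgd, hgd]
  simp only [PySem.List.pySetD, PySem.List.pySet?, PySem.List.pyIdx?, hlen]
  split_ifs with c1 c2 c3
  · simp only [Option.map_some, Option.getD_some]
    rw [List.getD_eq_getElem?_getD, List.getElem?_set_ne (by omega), ← List.getD_eq_getElem?_getD]
  · rfl
  · simp only [Option.map_some, Option.getD_some]
    rw [List.getD_eq_getElem?_getD, List.getElem?_set_ne (by omega), ← List.getD_eq_getElem?_getD]
  · rfl

lemma pv_graph1_nil {N : Int} (edges : List (Int × Int)) (hN : 1 ≤ N)
    (hok : ∀ e ∈ edges, pvEdgeOk N e.1 ∧ pvEdgeOk N e.2) :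
    PySem.List.pyGetD
      (edges.foldl (fun g e =>
          let g := PySem.List.pySetD g e.1 (PySem.List.pyGetD g e.1 [] ++ [e.2])
          PySem.List.pySetD g e.2 (PySem.List.pyGetD g e.2 [] ++ [e.1]))
        (List.replicate (N + 1).toNat ([] : List Int))) 1 [] = [] := by
  suffices h : ∀ (es : List (Int × Int)) (g : List (List Int)),
      (∀ e ∈ es, pvEdgeOk N e.1 ∧ pvEdgeOk N e.2) →
      g.length = (N + 1).toNat → PySem.List.pyGetD g 1 [] = [] →
      PySem.List.pyGetD (es.foldl (fun g e =>
          let g := PySem.List.pySetD g e.1 (PySem.List.pyGetD g e.1 [] ++ [e.2])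
          PySem.List.pySetD g e.2 (PySem.List.pyGetD g e.2 [] ++ [e.1])) g) 1 [] = [] by
    refine h edges _ hok (by simp) ?_
    rw [PySem.List.pyGetD_of_nonneg _ _ (show (0:Int) ≤ 1 by omega)]
    simpa using List.getD_replicate ([] : List Int) (show 1 < (N + 1).toNat by omega)
  intro es
  induction es with
  | nil => intro g _ _ hg1; simpa using hg1
  | cons e es ih =>
    intro g hok' hlen hg1
    rw [List.foldl_cons]
    refine ih _ (fun x hx => hok' x (List.mem_cons_of_mem _ hx)) ?_ ?_
    · simp [PySem.List.length_pySetD, hlen]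
    · have he := hok' e (List.mem_cons_self)
      rw [pv_setD_getD_one _ (by simp [PySem.List.length_pySetD, hlen]) hN he.2,
        pv_setD_getD_one _ hlen hN he.1, hg1]

-- root-only case: when graph slot 1 is empty both traversals stop after node 1
lemma pv_root_eq (g : List (List Int)) (values : List Int) (K : Int) (fuel : Nat)
    (hg1 : PySem.List.pyGetD g 1 [] = []) (hK : 0 ≤ K)
    (hv0 : 0 ≤ PySem.List.pyGetD values (1 - 1) 0) :
    pv_dfsB g values K (fuel + 1) 1 (-1) (pvDp0 K) 0 =
      pv_dfsA g values K (fuel + 1) 1 (-1) [] 0 := by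
  rw [pv_dfsA, pv_dfsB]
  simp only [hg1, List.foldl_nil]
  have hdp : (PySem.List.pyRange 0 (K + 1) 1).map (fun j =>
      if PySem.List.pyGetD values (1 - 1) 0 ≤ j then
        PySem.Int.mod (PySem.List.pyGetD (pvDp0 K) j 0 +
          PySem.List.pyGetD (pvDp0 K) (j - PySem.List.pyGetD values (1 - 1) 0) 0) pvMOD
      else PySem.List.pyGetD (pvDp0 K) j 0) =
      pvDpA K ([] ++ [PySem.List.pyGetD values (1 - 1) 0]) := by
    rw [pv_dpA_append, pv_stepA_eq_stepB hv0 hK (pv_len_dpA K [])]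
    rfl
  simp only [hdp, pv_count_eq_dpA]

-- ===== VERDICT (by name: the statement is the Claim_ definition above) =====
theorem find_subsets_sum_spec : Claim_equal_find_subsets_sum := by
  intro N M K values edges _ hpre
  obtain ⟨hN, hK, hcase⟩ := hpre
  show find_subsets_sum N M K values edges = find_subsets_sum_alt N M K values edges
  rw [find_subsets_sum, find_subsets_sum_alt]
  rcases hcase with ⟨_, hvals, _, _⟩ | ⟨hne, hh, hok⟩
  · exact (pv_dfs_eq _ values K hK hvals (N.toNat + 1) 1 (-1) [] 0).symm
  · refine (pv_root_eq _ values K N.toNat (pv_graph1_nil edges hN hok) hK ?_).symm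
    have : PySem.List.pyGetD values (1 - 1) 0 = values.headD 0 := by
      rw [show (1 - 1 : Int) = ((0 : Nat) : Int) by omega, PySem.List.pyGetD_natCast]
      cases values with
      | nil => rfl
      | cons a l => rfl
    rw [this]; exact hh
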